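-- pv_equiv track=rewrite | github.com/Vinterblomsten/indunction2ArmedBandit | 2armedBandit.py | getInductionList
-- ===== SOURCE A (Python) =====
-- def getInductionList(blockOrder: int):
--     musicalInductionLists = [
--     ("LaLv", "music/LaLvIntro.wav", "music/LaLvBG.wav"),
--     ("HaLv", "music/HaLvIntro.wav", "music/HaLvBG.wav"),
--     ("HaHv", "music/HaHvIntro.wav", "music/HaHvBG.wav"),
--     ("LaHv", "music/LaHvIntro.wav", "music/LaHvBG.wav"),
--     ("ctrl", 'music/CtrlIntro.wav', None),
--     ]
--     for i in range(blockOrder):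
--         musicalInductionLists.append(musicalInductionLists.pop(0))
--     return musicalInductionLists
-- ===== SOURCE B (Python) =====
-- def getInductionList(blockOrder: int):
--     base = [
--         ("LaLv", "music/LaLvIntro.wav", "music/LaLvBG.wav"),
--         ("HaLv", "music/HaLvIntro.wav", "music/HaLvBG.wav"),
--         ("HaHv", "music/HaHvIntro.wav", "music/HaHvBG.wav"),
--         ("LaHv", "music/LaHvIntro.wav", "music/LaHvBG.wav"),
--         ("ctrl", 'music/CtrlIntro.wav', None),
--     ]
--     offset = max(blockOrder, 0) % 5
--     return [base[(i + offset) % 5] for i in range(5)]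
-- ===== Notes on version B (the rewrite author's own statement) =====
-- stated objective: faster
-- what changed: Replaces the blockOrder-many pop(0)/append rotations with a single modular offset max(blockOrder,0)%5 and one 5-element modular-index comprehension, with no in-place mutation.
import Mathlib
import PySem

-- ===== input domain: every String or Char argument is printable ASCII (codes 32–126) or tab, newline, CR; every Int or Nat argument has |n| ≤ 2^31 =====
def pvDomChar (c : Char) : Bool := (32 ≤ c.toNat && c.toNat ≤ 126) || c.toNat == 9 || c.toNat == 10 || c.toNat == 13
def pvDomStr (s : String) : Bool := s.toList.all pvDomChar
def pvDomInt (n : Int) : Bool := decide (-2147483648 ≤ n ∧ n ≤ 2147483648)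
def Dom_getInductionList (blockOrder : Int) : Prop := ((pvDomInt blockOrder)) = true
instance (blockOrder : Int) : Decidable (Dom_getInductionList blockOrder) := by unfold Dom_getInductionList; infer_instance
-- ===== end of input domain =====

-- B replaces A's blockOrder pop(0)/append rotations with one modular offset and a
-- single 5-element modular-index construction (O(1) instead of O(blockOrder)).

-- the fixed 5-element base list both sources write out literally
def pvBase : List (String × String × Option String) :=
  [ ("LaLv", "music/LaLvIntro.wav", some "music/LaLvBG.wav"),
    ("HaLv", "music/HaLvIntro.wav", some "music/HaLvBG.wav"),
    ("HaHv", "music/HaHvIntro.wav", some "music/HaHvBG.wav"),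
    ("LaHv", "music/LaHvIntro.wav", some "music/LaHvBG.wav"),
    ("ctrl", "music/CtrlIntro.wav", none) ]

-- ===== PORT A =====
-- one loop body: lst.append(lst.pop(0)); pop on [] never happens (list stays length 5)
def pvRotStep (xs : List (String × String × Option String)) :
    List (String × String × Option String) :=
  match PySem.List.pop? xs 0 with
  | some (x, rest) => rest ++ [x]
  | none => xs

def getInductionList (blockOrder : Int) : List (String × String × Option String) :=
  (PySem.List.pyRange 0 blockOrder 1).foldl (fun xs _ => pvRotStep xs) pvBase

-- ===== PORT B =====
def getInductionList_alt (blockOrder : Int) : List (String × String × Option String) :=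
  let offset : Int := PySem.Int.mod (max blockOrder 0) 5
  -- base[(i+offset)%5]: the index is always in [0,5), so pyGet? is always some
  (PySem.List.pyRange 0 5 1).map
    (fun i => (PySem.List.pyGet? pvBase (PySem.Int.mod (i + offset) 5)).getD ("", "", none))

-- ===== PRECONDITION & SPEC =====
def Spec_getInductionList (blockOrder : Int) (out : List (String × String × Option String)) : Prop := out = getInductionList_alt blockOrder
instance (blockOrder : Int) (out : List (String × String × Option String)) : Decidable (Spec_getInductionList blockOrder out) := by unfold Spec_getInductionList; infer_instance

-- ===== CLAIM (what is proved, stated in full; the proofs are below) =====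
def Claim_equal_getInductionList : Prop := ∀ (blockOrder : Int), Dom_getInductionList blockOrder → Spec_getInductionList blockOrder (getInductionList blockOrder)

-- ===== LEMMAS AND PROOFS =====

theorem pv_foldl_const {α β : Type} (f : α → α) :
    ∀ (l : List β) (init : α), l.foldl (fun xs _ => f xs) init = f^[l.length] init := by
  intro l
  induction l with
  | nil => intro init; rfl
  | cons x xs ih =>
      intro init
      simp [List.foldl, ih, Function.iterate_succ_apply]

theorem pv_step5 : pvRotStep^[5] pvBase = pvBase := by decide

theorem pv_iter_add5 (n : ℕ) : pvRotStep^[n + 5] pvBase = pvRotStep^[n] pvBase := by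
  rw [Function.iterate_add_apply, pv_step5]

theorem pv_iter_mod (n : ℕ) : pvRotStep^[n] pvBase = pvRotStep^[n % 5] pvBase := by
  induction n using Nat.strong_induction_on with
  | _ n ih =>
    by_cases h : n < 5
    · rw [Nat.mod_eq_of_lt h]
    · have h5 : n - 5 + 5 = n := by omega
      have := pv_iter_add5 (n - 5)
      rw [h5] at this
      rw [this, ih (n - 5) (by omega)]
      congr 1
      omega

theorem pv_alt_eq_iter (r : ℕ) (hr : r < 5) (b : Int) (hb : PySem.Int.mod (max b 0) 5 = (r : Int)) :
    getInductionList_alt b = pvRotStep^[r] pvBase := by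
  unfold getInductionList_alt
  rw [hb]
  interval_cases r <;> decide

theorem getInductionList_spec_aux (b : Int) :
    getInductionList b = getInductionList_alt b := by
  set n : ℕ := (max b 0).toNat with hn
  have hmax : max b 0 = (n : Int) := by omega
  have hA : getInductionList b = pvRotStep^[n] pvBase := by
    unfold getInductionList
    rw [pv_foldl_const, PySem.List.length_pyRange_one]
    congr 1
    omega
  have hmod : PySem.Int.mod (max b 0) 5 = ((n % 5 : ℕ) : Int) := by
    rw [hmax]
    exact_mod_cast PySem.Int.mod_natCast n 5
  rw [hA, pv_iter_mod, pv_alt_eq_iter (n % 5) (Nat.mod_lt _ (by omega)) b hmod]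

-- ===== VERDICT (by name: the statement is the Claim_ definition above) =====
theorem getInductionList_spec : Claim_equal_getInductionList := by
  intro b _
  unfold Spec_getInductionList
  exact getInductionList_spec_aux b
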